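-- pv_equiv track=rewrite | github.com/SikolenkoMaxim/barapost | barapost/src/binning_modules/binning_spec.py | find_rank_for_filename
-- ===== SOURCE A (Python) =====
-- ranks = ("superkingdom", "phylum", "class", "order", "family", "genus", "species")
--
-- def find_rank_for_filename(sens, taxonomy):
--     """
--     Function forms name of binned file according to annotation and binning sensitivity.
--
--     :param sens: binning sensitivity;
--     :type sens: tuple<str, int>;
--     :param taxonomy: taxonomy from taxopnomy file;
--     :type taxonomy: tuple<tuple<str>>;
--     """
--     rank_name = sens[0]
--     rank_num = sens[1]
--
--     if taxonomy[rank_num][1] != "":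
--         # If we've got rank that we need -- return it
--         return taxonomy[rank_num][1]
--     else:
--         # Otherwise -- recursively go up to the root of taxonomy tree
--         new_sens = (ranks[rank_num-1], rank_num-1)
--         return find_rank_for_filename( new_sens, taxonomy ) + "_no-{}".format(rank_name)
-- ===== SOURCE B (Python) =====
-- ranks = ("superkingdom", "phylum", "class", "order", "family", "genus", "species")
--
-- def find_rank_for_filename(sens, taxonomy):
--     # Phase 1: find how many levels up the first non-empty taxonomy entry is.
--     r = sens[1]
--     k = 0
--     while taxonomy[r - k][1] == "":
--         k += 1
--     # Phase 2: collect the rank names of the skipped (empty) levels, then join.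
--     names = [sens[0] if i == 0 else ranks[r - i] for i in range(k)]
--     return taxonomy[r - k][1] + "".join("_no-" + nm for nm in reversed(names))
-- ===== Notes on version B (the rewrite author's own statement) =====
-- stated objective: alternative
-- what changed: Replaced the tail recursion that builds the suffix while unwinding by a two-phase algorithm: first a counting loop finds the distance k to the first non-empty taxonomy entry, then a list comprehension collects the skipped rank names and the result is assembled with one reversed join.
import Mathlib
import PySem

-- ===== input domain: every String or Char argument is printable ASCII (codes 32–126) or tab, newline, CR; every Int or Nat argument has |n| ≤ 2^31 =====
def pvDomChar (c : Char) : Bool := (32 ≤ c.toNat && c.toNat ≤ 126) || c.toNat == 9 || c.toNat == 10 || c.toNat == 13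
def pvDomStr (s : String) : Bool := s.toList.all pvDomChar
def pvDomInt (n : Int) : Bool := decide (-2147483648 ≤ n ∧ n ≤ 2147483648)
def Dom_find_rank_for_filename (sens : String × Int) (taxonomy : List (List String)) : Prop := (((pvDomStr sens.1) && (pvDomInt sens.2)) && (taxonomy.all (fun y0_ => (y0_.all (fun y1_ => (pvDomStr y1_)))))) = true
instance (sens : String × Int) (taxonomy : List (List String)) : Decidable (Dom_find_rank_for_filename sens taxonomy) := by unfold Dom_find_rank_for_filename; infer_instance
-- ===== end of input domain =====

-- B replaces A's suffix-building tail recursion by a two-phase algorithm: count the empty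
-- levels, collect the skipped rank names, assemble with one reversed join (alternative; same cost).

-- ===== PORT A =====
def pvRanks : List String := ["superkingdom", "phylum", "class", "order", "family", "genus", "species"]

-- taxonomy[rank_num][1] : none = IndexError
def pvGet2 (taxonomy : List (List String)) (i : Int) : Option String :=
  (PySem.List.pyGet? taxonomy i).bind (fun row => PySem.List.pyGet? row 1)

-- Literal transliteration of A's recursion; the fuel 2*len+2 bounds the recursion
-- depth whenever A returns (every visited index is a valid taxonomy index, so Pre_
-- guarantees the fuel is never exhausted); "" marks the error cases that Pre_
-- excludes (Python raises IndexError there).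
def pvGoA (fuel : Nat) (sens : String × Int) (taxonomy : List (List String)) : String :=
  match fuel with
  | 0 => ""
  | fuel + 1 =>
    let rank_name := sens.1
    let rank_num := sens.2
    match pvGet2 taxonomy rank_num with
    | none => ""
    | some s =>
      if s ≠ "" then s
      else
        match PySem.List.pyGet? pvRanks (rank_num - 1) with
        | none => ""
        | some nm => pvGoA fuel (nm, rank_num - 1) taxonomy ++ ("_no-" ++ rank_name)

def find_rank_for_filename (sens : String × Int) (taxonomy : List (List String)) : String :=
  pvGoA (2 * taxonomy.length + 2) sens taxonomy

-- ===== PORT B =====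
-- phase 1 of Source B: the counting while loop (fuel-bounded; none = IndexError, excluded by Pre_)
def pvFindK (fuel : Nat) (taxonomy : List (List String)) (r : Int) (k : Nat) : Option Nat :=
  match fuel with
  | 0 => none
  | fuel + 1 =>
    match pvGet2 taxonomy (r - k) with
    | none => none
    | some s => if s == "" then pvFindK fuel taxonomy r (k + 1) else some k

-- the comprehension body: sens[0] if i == 0 else ranks[r - i]  ("" = IndexError, excluded by Pre_)
def pvName (rank_name : String) (r : Int) (i : Int) : String :=
  if i == 0 then rank_name else (PySem.List.pyGet? pvRanks (r - i)).getD ""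

def find_rank_for_filename_alt (sens : String × Int) (taxonomy : List (List String)) : String :=
  match pvFindK (2 * taxonomy.length + 2) taxonomy sens.2 0 with
  | none => ""
  | some k =>
    let names := (PySem.List.pyRange 0 (k : Int) 1).map (pvName sens.1 sens.2)
    (pvGet2 taxonomy (sens.2 - k)).getD "" ++
      PySem.Str.join "" (names.reverse.map (fun nm => "_no-" ++ nm))

-- ===== PRECONDITION & SPEC =====
-- Pre_: exactly the inputs on which Python A returns (no IndexError): walking down from
-- rank_num, some position k stops with a nonempty taxonomy[·][1], and every position
-- passed on the way has a row with an empty second entry and a valid ranks index.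
def Pre_find_rank_for_filename (sens : String × Int) (taxonomy : List (List String)) : Prop :=
  ∃ k < 2 * taxonomy.length + 1,
    (∃ s, pvGet2 taxonomy (sens.2 - k) = some s ∧ s ≠ "") ∧
    ∀ m < k, pvGet2 taxonomy (sens.2 - m) = some "" ∧
      -7 ≤ sens.2 - m - 1 ∧ sens.2 - m - 1 ≤ 6
instance (sens : String × Int) (taxonomy : List (List String)) : Decidable (Pre_find_rank_for_filename sens taxonomy) := by unfold Pre_find_rank_for_filename; infer_instance

def pvWitness_find_rank_for_filename : (String × Int) × List (List String) :=
  (("genus", 1), [["superkingdom", "Bacteria"], ["genus", ""]])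

def Spec_find_rank_for_filename (sens : String × Int) (taxonomy : List (List String)) (out : String) : Prop := out = find_rank_for_filename_alt sens taxonomy
instance (sens : String × Int) (taxonomy : List (List String)) (out : String) : Decidable (Spec_find_rank_for_filename sens taxonomy out) := by unfold Spec_find_rank_for_filename; infer_instance

-- ===== CLAIM (what is proved, stated in full; the proofs are below) =====
def Claim_equal_find_rank_for_filename : Prop := ∀ (sens : String × Int) (taxonomy : List (List String)), Dom_find_rank_for_filename sens taxonomy → Pre_find_rank_for_filename sens taxonomy → Spec_find_rank_for_filename sens taxonomy (find_rank_for_filename sens taxonomy)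

-- ===== LEMMAS AND PROOFS =====

-- "".join with an empty separator is flatten of the parts
theorem pv_intercalate_nil (xs : List (List Char)) : List.intercalate [] xs = xs.flatten := by
  induction xs with
  | nil => simp [List.intercalate]
  | cons x xs ih => cases xs <;> simp_all [List.intercalate]

theorem pv_join_snoc (xs : List String) (a : String) :
    PySem.Str.join "" (xs ++ [a]) = PySem.Str.join "" xs ++ a := by
  simp [PySem.Str.join, PySem.Chars.join, pv_intercalate_nil, String.ofList_append]

-- phase 1 finds exactly the k that Pre_ exhibits (minimal by Pre_'s shape)
theorem pvFindK_eq (taxonomy : List (List String)) (r : Int) (k : Nat) (s : String)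
    (hs : pvGet2 taxonomy (r - k) = some s) (hne : s ≠ "")
    (hsteps : ∀ m < k, pvGet2 taxonomy (r - m) = some "") :
    ∀ (fuel j : Nat), j ≤ k → k - j < fuel →
      pvFindK fuel taxonomy r j = some k := by
  intro fuel
  induction fuel with
  | zero => intro j _ hfj; omega
  | succ fuel ih =>
    intro j hjk hf
    by_cases hj : j = k
    · subst hj
      simp only [pvFindK]
      rw [hs]
      simp [hne]
    · have hjl : j < k := lt_of_le_of_ne hjk hj
      have h0 := hsteps j hjl
      simp only [pvFindK]
      rw [h0]
      simp only [BEq.rfl, if_pos]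
      have := ih (j + 1) hjl (by omega)
      simpa using this

-- A's recursion returns the stop entry followed by the reversed "_no-" names
theorem pvGoA_eq (taxonomy : List (List String)) :
    ∀ (k fuel : Nat) (r : Int) (name s : String), k < fuel →
      pvGet2 taxonomy (r - k) = some s → s ≠ "" →
      (∀ m < k, pvGet2 taxonomy (r - m) = some "" ∧ -7 ≤ r - m - 1 ∧ r - m - 1 ≤ 6) →
      pvGoA fuel (name, r) taxonomy =
        s ++ PySem.Str.join ""
          (((List.range k).map (fun i : Nat => pvName name r (i : Int))).reverse.map (fun nm => "_no-" ++ nm)) := by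
  intro k
  induction k with
  | zero =>
    intro fuel r name s hf hs hne _
    cases fuel with
    | zero => omega
    | succ fuel =>
      simp only [Int.natCast_zero, sub_zero] at hs
      simp only [pvGoA, hs]
      simp [hne, PySem.Str.join, PySem.Chars.join, List.intercalate]
  | succ k ih =>
    intro fuel r name s hf hs hne hsteps
    cases fuel with
    | zero => omega
    | succ fuel =>
      have h0 := hsteps 0 (Nat.succ_pos k)
      simp only [Int.natCast_zero, sub_zero] at h0
      simp only [pvGoA, h0.1]
      simp only [ne_eq, not_true_eq_false, reduceIte]
      cases hn : PySem.List.pyGet? pvRanks (r - 1) with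
      | none =>
        exfalso
        rw [PySem.List.pyGet?_eq_none_iff] at hn
        apply hn
        simp [PySem.Raise.InRange, pvRanks]
        omega
      | some nm =>
        have hstop : pvGet2 taxonomy (r - 1 - (k : Int)) = some s := by
          have e : r - 1 - (k : Int) = r - (((k : Nat) + 1 : Nat) : Int) := by push_cast; ring
          rw [e]; exact hs
        have hsteps' : ∀ m < k, pvGet2 taxonomy (r - 1 - m) = some "" ∧
            -7 ≤ r - 1 - m - 1 ∧ r - 1 - m - 1 ≤ 6 := by
          intro m hm
          have h := hsteps (m + 1) (Nat.succ_lt_succ hm)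
          have e : r - 1 - (m : Int) = r - (((m : Nat) + 1 : Nat) : Int) := by push_cast; ring
          rw [e]; exact h
        dsimp only
        rw [ih fuel (r - 1) nm s (Nat.lt_of_succ_lt_succ hf) hstop hne hsteps']
        -- names (r, k+1, name) = name :: names (r-1, k, nm)
        have hnames : (List.range (k + 1)).map (fun i : Nat => pvName name r (i : Int)) =
            name :: (List.range k).map (fun i : Nat => pvName nm (r - 1) (i : Int)) := by
          rw [List.range_succ_eq_map, List.map_cons, List.map_map]
          refine List.cons_eq_cons.mpr ⟨by simp [pvName], ?_⟩
          apply List.map_congr_left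
          intro i _
          show pvName name r ((i + 1 : Nat) : Int) = pvName nm (r - 1) i
          cases i with
          | zero =>
            simp only [pvName, Int.natCast_zero]
            norm_num
            rw [hn]
            rfl
          | succ j =>
            simp only [pvName]
            have h1 : ((j + 1 + 1 : Nat) : Int) ≠ 0 := by push_cast; omega
            have h2 : ((j + 1 : Nat) : Int) ≠ 0 := by push_cast; omega
            rw [if_neg (by simpa using h1), if_neg (by simpa using h2)]
            congr 2
            push_cast
            ring
        rw [hnames]
        simp only [List.reverse_cons, List.map_append, List.map_cons, List.map_nil]
        rw [pv_join_snoc]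
        simp [String.append_assoc]

-- ===== VERDICT (by name: the statement is the Claim_ definition above) =====
theorem find_rank_for_filename_spec : Claim_equal_find_rank_for_filename := by
  intro sens taxonomy _ hpre
  obtain ⟨k, hkb, ⟨s, hs, hne⟩, hsteps⟩ := hpre
  unfold Spec_find_rank_for_filename find_rank_for_filename find_rank_for_filename_alt
  rw [pvFindK_eq taxonomy sens.2 k s hs hne (fun m hm => (hsteps m hm).1)
       (2 * taxonomy.length + 2) 0 (Nat.zero_le _) (by omega)]
  rw [pvGoA_eq taxonomy k (2 * taxonomy.length + 2) sens.2 sens.1 s (by omega) hs hne hsteps]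
  simp only [hs, Option.getD_some, PySem.List.pyRange_zero_natCast, List.map_map]
  rfl
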